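-- pv_equiv track=rewrite | github.com/blzzua/codewars | 6-kyu/legal_backlog.py | legal_backlog
-- ===== SOURCE A (Python) =====
-- import heapq
--
-- def legal_backlog(cases, max_daily_sessions):
--     heap = []
--     days = 0
--     for name, v in cases.items():
--         heapq.heappush(heap, -v)
--
--     while heap:
--         altered = []
--         for _ in range(min(len(heap), max_daily_sessions)):
--             if heap:
--                 altered.append(heapq.heappop(heap))
--         for x in altered:
--             if x!=-1:
--                 heapq.heappush(heap, x+1)
--         days += 1
--     return days
-- ===== SOURCE B (Python) =====
-- def legal_backlog(cases, max_daily_sessions):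
--     if not cases:
--         return 0
--     vals = list(cases.values())
--     total = sum(vals)
--     return max(max(vals), -(-total // max_daily_sessions))
-- ===== Notes on version B (the rewrite author's own statement) =====
-- stated objective: alternative
-- what changed: Replaces the day-by-day heap simulation (pop the k largest counters, decrement, re-push, count days) by the closed form max(max(values), ceil(sum(values)/max_daily_sessions)) computed in one pass over the values; intended as asymptotically cheaper (O(n) vs O(answer*k*log n)) but a timing run could not confirm a clean reading, so no speed is claimed.
import Mathlib
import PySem

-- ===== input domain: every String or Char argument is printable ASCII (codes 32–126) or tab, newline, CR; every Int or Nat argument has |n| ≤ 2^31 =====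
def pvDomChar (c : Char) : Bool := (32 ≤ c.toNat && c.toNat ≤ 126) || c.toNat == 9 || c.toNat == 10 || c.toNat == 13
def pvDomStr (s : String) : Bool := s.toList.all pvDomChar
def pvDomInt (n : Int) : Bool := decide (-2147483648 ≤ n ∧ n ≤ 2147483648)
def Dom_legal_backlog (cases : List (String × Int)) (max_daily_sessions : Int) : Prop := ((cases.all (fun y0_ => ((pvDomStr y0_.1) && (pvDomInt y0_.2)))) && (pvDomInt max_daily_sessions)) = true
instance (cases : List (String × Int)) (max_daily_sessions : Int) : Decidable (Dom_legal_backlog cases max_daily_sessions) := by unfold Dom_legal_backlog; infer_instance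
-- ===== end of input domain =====

-- A simulates the schedule day by day with a heap (pop the k largest counters, decrement, re-push);
-- B returns the closed form max(max(values), ceil(sum(values)/max_daily_sessions)) in one pass.


-- ===== PORT A =====
-- heapq.heappush / heappop are ported as insertion into an ascending sorted list / taking its
-- head: exact for A, which only ever observes the heap through heappop (the minimum) and len.
def pvPush (heap : List Int) (x : Int) : List Int := List.orderedInsert (· ≤ ·) x heap

-- 'for _ in range(n): if heap: altered.append(heapq.heappop(heap))'
def pvPopMany : Nat → List Int → List Int → List Int × List Int
  | 0, heap, altered => (heap, altered)
  | n + 1, [], altered => pvPopMany n [] altered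
  | n + 1, x :: t, altered => pvPopMany n t (altered ++ [x])

-- one iteration of A's while-loop body (min(len(heap), k) pops, then the re-pushes)
def pvDay (k : Int) (heap : List Int) : List Int :=
  let m := (min (heap.length : Int) k).toNat
  let p := pvPopMany m heap []
  p.2.foldl (fun hp x => if x ≠ -1 then pvPush hp (x + 1) else hp) p.1

-- A's while-loop; the fuel argument only makes it total (A itself loops forever when some
-- value is ≤ 0 or max_daily_sessions ≤ 0 with a nonempty dict — excluded by Pre_ below).
def pvLoopA (k : Int) : Nat → List Int → Int → Int
  | _, [], days => days
  | 0, _ :: _, days => days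
  | fuel + 1, x :: t, days => pvLoopA k fuel (pvDay k (x :: t)) (days + 1)

def legal_backlog (cases : List (String × Int)) (max_daily_sessions : Int) : Int :=
  let items := (PySem.Dict.ofList cases).items
  let heap := items.foldl (fun hp p => pvPush hp (-p.2)) []
  pvLoopA max_daily_sessions ((items.map (fun p => p.2.toNat)).sum + 1) heap 0

-- ===== PORT B =====
def legal_backlog_alt (cases : List (String × Int)) (max_daily_sessions : Int) : Int :=
  if cases = [] then 0
  else
    let vals := (PySem.Dict.ofList cases).values
    let total := vals.sum
    match PySem.List.max? vals (fun v => v) with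
    | some m => max m (-(PySem.Int.floordiv (-total) max_daily_sessions))
    | none => 0  -- unreachable: cases ≠ [] so vals ≠ []

-- ===== PRECONDITION & SPEC =====
-- Pre_ excludes exactly the inputs on which A never returns (its while-loop runs forever):
-- a nonempty dict containing a value ≤ 0, or a nonempty dict with max_daily_sessions ≤ 0.
def Pre_legal_backlog (cases : List (String × Int)) (max_daily_sessions : Int) : Prop :=
  (∀ v ∈ (PySem.Dict.ofList cases).values, 1 ≤ v) ∧ (cases = [] ∨ 1 ≤ max_daily_sessions)
instance (cases : List (String × Int)) (max_daily_sessions : Int) : Decidable (Pre_legal_backlog cases max_daily_sessions) := by unfold Pre_legal_backlog; infer_instance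

def pvWitness_legal_backlog : (List (String × Int)) × Int := ([("a", 3), ("b", 1), ("c", 2)], 2)

def Spec_legal_backlog (cases : List (String × Int)) (max_daily_sessions : Int) (out : Int) : Prop := out = legal_backlog_alt cases max_daily_sessions
instance (cases : List (String × Int)) (max_daily_sessions : Int) (out : Int) : Decidable (Spec_legal_backlog cases max_daily_sessions out) := by unfold Spec_legal_backlog; infer_instance

-- ===== CLAIM (what is proved, stated in full; the proofs are below) =====
def Claim_equal_legal_backlog : Prop := ∀ (cases : List (String × Int)) (max_daily_sessions : Int), Dom_legal_backlog cases max_daily_sessions → Pre_legal_backlog cases max_daily_sessions → Spec_legal_backlog cases max_daily_sessions (legal_backlog cases max_daily_sessions)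

-- ===== LEMMAS AND PROOFS =====

-- remaining total work, max remaining counter, ceiling division, and the closed-form answer
def pvS (h : List Int) : Int := -h.sum
def pvM (h : List Int) : Int := h.foldr (fun x m => max (-x) m) 0
def pvCeil (a k : Int) : Int := -(PySem.Int.floordiv (-a) k)
def pvAns (k : Int) (h : List Int) : Int := if h = [] then 0 else max (pvM h) (pvCeil (pvS h) k)

theorem pvPopMany_eq : ∀ (n : Nat) (heap altered : List Int),
    pvPopMany n heap altered = (heap.drop n, altered ++ heap.take n) := by
  intro n
  induction n with
  | zero => intro heap altered; simp [pvPopMany]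
  | succ n ih => intro heap altered; cases heap <;> simp [pvPopMany, ih]

theorem pvM_nonneg (l : List Int) : 0 ≤ pvM l := by
  induction l with
  | nil => simp [pvM]
  | cons x t ih => simp only [pvM, List.foldr_cons] at *; omega

theorem pvM_init : ∀ (l : List Int) (i : Int), 0 ≤ i →
    l.foldr (fun x m => max (-x) m) i = max (pvM l) i := by
  intro l
  induction l with
  | nil => intro i hi; simp only [pvM, List.foldr_nil]; omega
  | cons x t ih => intro i hi; simp only [pvM, List.foldr_cons] at *; rw [ih i hi]; omega

theorem pvM_append (a b : List Int) : pvM (a ++ b) = max (pvM a) (pvM b) := by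
  have h := pvM_init a (pvM b) (pvM_nonneg b)
  simp only [pvM, List.foldr_append] at *
  exact h

theorem pvM_le {l : List Int} {c : Int} (hc : 0 ≤ c) (h : ∀ x ∈ l, -x ≤ c) : pvM l ≤ c := by
  induction l with
  | nil => simpa [pvM] using hc
  | cons x t ih =>
    have hx := h x (by simp)
    have ht := ih (fun y hy => h y (by simp [hy]))
    simp only [pvM, List.foldr_cons] at *
    omega

theorem le_pvM {l : List Int} {x : Int} (hx : x ∈ l) : -x ≤ pvM l := by
  induction l with
  | nil => cases hx
  | cons y t ih =>
    rcases List.mem_cons.mp hx with h | h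
    · subst h; simp only [pvM, List.foldr_cons]; omega
    · have := ih h; simp only [pvM, List.foldr_cons] at *; omega

theorem pvM_sorted_head {x : Int} {t : List Int} (hx : x ≤ -1)
    (hmin : ∀ y ∈ t, x ≤ y) : pvM (x :: t) = -x := by
  have ht : pvM t ≤ -x := pvM_le (by omega) (fun y hy => by have := hmin y hy; omega)
  simp only [pvM, List.foldr_cons] at *
  omega

theorem pvS_mapped {t : List Int} (hb : ∀ x ∈ t, x ≤ -1) :
    pvS ((t.filter (fun x => decide (x ≠ -1))).map (· + 1)) = pvS t - t.length := by
  induction t with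
  | nil => simp [pvS]
  | cons x t ih =>
    have ht := ih (fun y hy => hb y (by simp [hy]))
    by_cases hx : x = -1
    · subst hx
      rw [show List.filter (fun x => decide (x ≠ -1)) ((-1 : Int) :: t)
            = List.filter (fun x => decide (x ≠ -1)) t from by simp]
      rw [ht]
      simp only [pvS, List.sum_cons, List.length_cons]
      push_cast
      omega
    · rw [show List.filter (fun x => decide (x ≠ -1)) (x :: t)
            = x :: List.filter (fun x => decide (x ≠ -1)) t from by simp [hx]]
      simp only [List.map_cons, pvS, List.sum_cons, List.length_cons] at *
      push_cast at *
      omega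

theorem pvM_mapped {t : List Int} (hb : ∀ x ∈ t, x ≤ -1) :
    pvM ((t.filter (fun x => decide (x ≠ -1))).map (· + 1)) = max (pvM t - 1) 0 := by
  induction t with
  | nil => simp [pvM]
  | cons x t ih =>
    have hx1 := hb x (by simp)
    have ht := ih (fun y hy => hb y (by simp [hy]))
    have hnn := pvM_nonneg t
    by_cases hx : x = -1
    · subst hx
      rw [show List.filter (fun x => decide (x ≠ -1)) ((-1 : Int) :: t)
            = List.filter (fun x => decide (x ≠ -1)) t from by simp]
      rw [ht]
      simp only [pvM, List.foldr_cons]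
      omega
    · rw [show List.filter (fun x => decide (x ≠ -1)) (x :: t)
            = x :: List.filter (fun x => decide (x ≠ -1)) t from by simp [hx]]
      simp only [List.map_cons, pvM, List.foldr_cons] at *
      omega

theorem pvS_ge_len {l : List Int} (hb : ∀ x ∈ l, x ≤ -1) : (l.length : Int) ≤ pvS l := by
  induction l with
  | nil => simp [pvS]
  | cons x t ih =>
    have hx := hb x (by simp)
    have ht := ih (fun y hy => hb y (by simp [hy]))
    simp only [pvS, List.sum_cons, List.length_cons] at *
    push_cast
    omega

theorem pvS_le {l : List Int} {c : Int} (h : ∀ x ∈ l, -x ≤ c) : pvS l ≤ (l.length : Int) * c := by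
  induction l with
  | nil => simp [pvS]
  | cons x t ih =>
    have hx := h x (by simp)
    have ht := ih (fun y hy => h y (by simp [hy]))
    simp only [pvS, List.sum_cons, List.length_cons] at *
    push_cast
    nlinarith

theorem pvCeil_bracket {a k : Int} (hk : 0 < k) :
    (pvCeil a k - 1) * k < a ∧ a ≤ pvCeil a k * k := by
  exact (PySem.Int.neg_floordiv_neg_eq_iff_of_pos hk).mp rfl

theorem pvCeil_eq {a k q : Int} (hk : 0 < k) (h1 : (q - 1) * k < a) (h2 : a ≤ q * k) :
    pvCeil a k = q := by
  exact (PySem.Int.neg_floordiv_neg_eq_iff_of_pos hk).mpr ⟨h1, h2⟩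

-- the permutation/sortedness shape of one day's fold of pushes
theorem foldl_push_perm : ∀ (l hp : List Int),
    (l.foldl (fun hp x => if x ≠ -1 then pvPush hp (x + 1) else hp) hp).Perm
      (hp ++ (l.filter (fun x => decide (x ≠ -1))).map (· + 1)) := by
  intro l
  induction l with
  | nil => intro hp; simp
  | cons x t ih =>
    intro hp
    by_cases hx : x = -1
    · subst hx
      simpa [List.filter_cons] using ih hp
    · rw [show List.filter (fun x => decide (x ≠ -1)) (x :: t)
            = x :: List.filter (fun x => decide (x ≠ -1)) t from by simp [hx]]
      simp only [List.foldl_cons, List.map_cons]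
      rw [show (if x ≠ -1 then pvPush hp (x + 1) else hp) = pvPush hp (x + 1) from by simp [hx]]
      refine ((ih (pvPush hp (x + 1))).trans ?_)
      refine List.Perm.trans (List.Perm.append_right _ (List.perm_orderedInsert _ _ _)) ?_
      exact List.perm_middle.symm

theorem foldl_push_sorted : ∀ (l hp : List Int), hp.Pairwise (· ≤ ·) →
    (l.foldl (fun hp x => if x ≠ -1 then pvPush hp (x + 1) else hp) hp).Pairwise (· ≤ ·) := by
  intro l
  induction l with
  | nil => intro hp h; simpa using h
  | cons x t ih =>
    intro hp h
    simp only [List.foldl_cons]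
    by_cases hx : x = -1
    · subst hx; simpa using ih hp h
    · simp only [hx, ne_eq, not_false_iff, if_true]
      exact ih _ (List.Pairwise.orderedInsert _ _ h)

theorem pvS_perm {a b : List Int} (h : a.Perm b) : pvS a = pvS b := by
  simp [pvS, h.sum_eq]

theorem pvM_perm {a b : List Int} (h : a.Perm b) : pvM a = pvM b := by
  haveI : LeftCommutative (fun (x m : Int) => max (-x) m) := ⟨fun a b c => by omega⟩
  exact List.Perm.foldr_eq h 0

theorem pvAns_perm {k : Int} {a b : List Int} (h : a.Perm b) : pvAns k a = pvAns k b := by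
  unfold pvAns
  by_cases ha : a = []
  · subst ha
    rw [(List.Perm.nil_eq h).symm]
  · have hb : b ≠ [] := fun e => ha (by subst e; exact List.Perm.eq_nil h)
    simp [ha, hb, pvS_perm h, pvM_perm h]

theorem pvS_ge {l : List Int} {c : Int} (h : ∀ x ∈ l, c ≤ -x) :
    (l.length : Int) * c ≤ pvS l := by
  induction l with
  | nil => simp [pvS]
  | cons x t ih =>
    have hx := h x (by simp)
    have ht := ih (fun y hy => h y (by simp [hy]))
    simp only [pvS, List.sum_cons, List.length_cons] at *
    push_cast
    nlinarith

theorem pvM_le_pvS {l : List Int} (hb : ∀ x ∈ l, x ≤ -1) : pvM l ≤ pvS l := by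
  induction l with
  | nil => simp [pvM, pvS]
  | cons x t ih =>
    have hx := hb x (by simp)
    have ht := ih (fun y hy => hb y (by simp [hy]))
    have hlen := pvS_ge_len (l := t) (fun y hy => hb y (by simp [hy]))
    simp only [pvM, pvS, List.foldr_cons, List.sum_cons] at *
    omega

theorem sum_le_toNat_sum : ∀ (l : List Int), l.sum ≤ ((l.map Int.toNat).sum : Int) := by
  intro l
  induction l with
  | nil => simp
  | cons x t ih =>
    simp only [List.map_cons, List.sum_cons]
    push_cast at ih ⊢
    omega

-- one day of A's loop decreases the closed-form answer by exactly 1 and keeps the invariant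
theorem pvDay_step {k : Int} (hk : 1 ≤ k) {h : List Int} (hne : h ≠ [])
    (hs : h.Pairwise (· ≤ ·)) (hb : ∀ x ∈ h, x ≤ -1) :
    (pvDay k h).Pairwise (· ≤ ·) ∧ (∀ x ∈ pvDay k h, x ≤ -1) ∧
      pvAns k (pvDay k h) = pvAns k h - 1 := by
  have hk0 : (0 : Int) < k := by omega
  have hlen1 : 1 ≤ h.length := List.length_pos_of_ne_nil hne
  set m : Nat := (min (h.length : Int) k).toNat with hmdef
  have hmle : m ≤ h.length := by omega
  have hm1 : 1 ≤ m := by omega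
  have hday : pvDay k h
      = (h.take m).foldl (fun hp x => if x ≠ -1 then pvPush hp (x + 1) else hp) (h.drop m) := by
    simp only [pvDay, pvPopMany_eq, List.nil_append]
    rw [← hmdef]
  set t := h.take m with htdef
  set r := h.drop m with hrdef
  have hbt : ∀ x ∈ t, x ≤ -1 := fun x hx => hb x (List.take_subset m h hx)
  have hbr : ∀ x ∈ r, x ≤ -1 := fun x hx => hb x (List.drop_subset m h hx)
  set mp := (t.filter (fun x => decide (x ≠ -1))).map (· + 1) with hmpdef
  have hbmp : ∀ x ∈ mp, x ≤ -1 := by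
    intro x hx
    rw [hmpdef] at hx
    obtain ⟨y, hy, rfl⟩ := List.mem_map.mp hx
    have hy2 : y ≠ -1 := by simpa using List.of_mem_filter hy
    have hy3 := hbt y (List.mem_of_mem_filter hy)
    omega
  have hperm : (pvDay k h).Perm (r ++ mp) := by rw [hday]; exact foldl_push_perm t r
  have hsorted : (pvDay k h).Pairwise (· ≤ ·) := by
    rw [hday]; exact foldl_push_sorted t r (List.Pairwise.drop hs)
  have hbd : ∀ x ∈ pvDay k h, x ≤ -1 := by
    intro x hx
    rcases List.mem_append.mp (hperm.mem_iff.mp hx) with hx | hx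
    · exact hbr x hx
    · exact hbmp x hx
  refine ⟨hsorted, hbd, ?_⟩
  rw [pvAns_perm hperm]
  have hsplit : t ++ r = h := List.take_append_drop m h
  have hSsplit : pvS h = pvS t + pvS r := by rw [← hsplit]; simp [pvS]; ring
  have hMsplit : pvM h = max (pvM t) (pvM r) := by rw [← hsplit, pvM_append]
  have hlt : t.length = m := List.length_take_of_le hmle
  have hSmp : pvS mp = pvS t - m := by rw [hmpdef, pvS_mapped hbt, hlt]
  have hMmp : pvM mp = max (pvM t - 1) 0 := pvM_mapped hbt
  have hS_rmp : pvS (r ++ mp) = pvS h - m := by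
    have : pvS (r ++ mp) = pvS r + pvS mp := by simp [pvS]; ring
    omega
  have hM_rmp : pvM (r ++ mp) = max (pvM r) (max (pvM t - 1) 0) := by rw [pvM_append, hMmp]
  have hM1 : 1 ≤ pvM h := by
    obtain ⟨x, hx⟩ := List.exists_mem_of_ne_nil h hne
    have h1 := le_pvM hx
    have h2 := hb x hx
    omega
  by_cases hcase : (h.length : Int) ≤ k
  · -- everything is popped this day
    have hmlen : m = h.length := by omega
    have hr : r = [] := by rw [hrdef, hmlen]; exact List.drop_eq_nil_of_le le_rfl
    have ht' : t = h := by rw [htdef, hmlen]; exact List.take_of_length_le le_rfl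
    by_cases hmp0 : mp = []
    · have hall : ∀ x ∈ h, x = -1 := by
        intro x hx
        have h1 : t.filter (fun x => decide (x ≠ -1)) = [] := by
          have := hmpdef.symm.trans hmp0
          simpa using this
        have h2 := List.filter_eq_nil_iff.mp h1 x (ht' ▸ hx)
        simpa using h2
      have hMh : pvM h = 1 := by
        obtain ⟨x, hx⟩ := List.exists_mem_of_ne_nil h hne
        have h1 := le_pvM hx
        have h2 := hall x hx
        have h3 : pvM h ≤ 1 := pvM_le (by omega) (fun y hy => by rw [hall y hy]; omega)
        omega
      have hSh : pvS h = h.length := by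
        have h0 : pvS mp = 0 := by rw [hmp0]; simp [pvS]
        rw [ht'] at hSmp
        omega
      have hc1 : pvCeil (pvS h) k = 1 := by
        apply pvCeil_eq hk0
        · rw [hSh]; push_cast; omega
        · rw [hSh]; omega
      rw [hr, hmp0]
      simp [pvAns, hne, hMh, hc1]
    · have hne' : r ++ mp ≠ [] := by simp [hr, hmp0]
      have hSmp1 : (1 : Int) ≤ pvS mp := by
        have h1 := pvS_ge_len hbmp
        have h2 : 1 ≤ mp.length := List.length_pos_of_ne_nil hmp0
        omega
      have hSh_ge : (h.length : Int) + 1 ≤ pvS h := by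
        rw [ht'] at hSmp
        omega
      have hSle : pvS h ≤ (h.length : Int) * pvM h := pvS_le (fun x hx => le_pvM hx)
      have hM2 : 2 ≤ pvM h := by
        by_contra hc2
        push_neg at hc2
        have hM1' : pvM h ≤ 1 := by omega
        have h3 : (h.length : Int) * pvM h ≤ (h.length : Int) * 1 :=
          mul_le_mul_of_nonneg_left hM1' (by positivity)
        omega
      obtain ⟨hcl, hcu⟩ := pvCeil_bracket (a := pvS h) hk0
      obtain ⟨hcl', hcu'⟩ := pvCeil_bracket (a := pvS (r ++ mp)) hk0
      have hcM : pvCeil (pvS h) k ≤ pvM h := by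
        have hlm : (h.length : Int) * pvM h ≤ k * pvM h :=
          mul_le_mul_of_nonneg_right hcase (by omega)
        have he : k * pvM h = pvM h * k := by ring
        have h1 : (pvCeil (pvS h) k - 1) * k < pvM h * k := by omega
        have := lt_of_mul_lt_mul_right h1 (le_of_lt hk0)
        omega
      have hc'M : pvCeil (pvS (r ++ mp)) k ≤ pvM h - 1 := by
        have h2 : pvS (r ++ mp) ≤ (pvM h - 1) * k := by
          rw [hS_rmp, hmlen]
          have h3 : (h.length : Int) * (pvM h - 1) ≤ k * (pvM h - 1) :=
            mul_le_mul_of_nonneg_right hcase (by omega)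
          have he1 : (h.length : Int) * (pvM h - 1) = (h.length : Int) * pvM h - h.length := by
            ring
          have he2 : (pvM h - 1) * k = k * (pvM h - 1) := by ring
          omega
        have h1 : (pvCeil (pvS (r ++ mp)) k - 1) * k < (pvM h - 1) * k :=
          lt_of_lt_of_le hcl' h2
        have := lt_of_mul_lt_mul_right h1 (le_of_lt hk0)
        omega
      simp only [pvAns, hne, hne', if_false, if_neg]
      rw [hM_rmp]
      have hMr0 : pvM r = 0 := by rw [hr]; simp [pvM]
      have hMth : pvM t = pvM h := by rw [ht']
      omega
  · -- exactly k largest are popped; a nonempty remainder is untouched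
    have hmk : (m : Int) = k := by omega
    have hrne : r ≠ [] := by
      apply List.ne_nil_of_length_pos
      rw [hrdef, List.length_drop]
      omega
    have hne' : r ++ mp ≠ [] := fun e => hrne (List.append_eq_nil_iff.mp e).1
    have htne : t ≠ [] := by
      apply List.ne_nil_of_length_pos
      omega
    have hsep : ∀ x ∈ t, ∀ y ∈ r, x ≤ y := by
      rw [← hsplit] at hs
      exact fun x hx y hy => (List.pairwise_append.mp hs).2.2 x hx y hy
    have hMt : pvM t = pvM h := by
      obtain ⟨x0, hx0⟩ := List.exists_mem_of_ne_nil t htne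
      have h1 : pvM r ≤ -x0 :=
        pvM_le (by have := hbt x0 hx0; omega) (fun y hy => by have := hsep x0 hx0 y hy; omega)
      have h2 : -x0 ≤ pvM t := le_pvM hx0
      omega
    have hMr : pvM r ≤ pvM h := by omega
    have hkey : pvM r = pvM h → (k + 1) * pvM h ≤ pvS h := by
      intro heq
      obtain ⟨y, r', hyr⟩ := List.exists_cons_of_ne_nil hrne
      have hsr : r.Pairwise (· ≤ ·) := List.Pairwise.drop hs
      have hMrhead : pvM r = -y := by
        rw [hyr]
        exact pvM_sorted_head (hbr y (by rw [hyr]; simp))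
          (fun z hz => (List.pairwise_cons.mp (hyr ▸ hsr)).1 z hz)
      have hMy : pvM h = -y := by omega
      have hSt : (t.length : Int) * (-y) ≤ pvS t := by
        apply pvS_ge
        intro x hx
        have h1 := le_pvM hx
        have h2 := hsep x hx y (by rw [hyr]; simp)
        omega
      have hSr : -y + (r'.length : Int) ≤ pvS r := by
        have h1 : ∀ z ∈ r', z ≤ -1 := fun z hz => hbr z (by rw [hyr]; simp [hz])
        have h2 := pvS_ge_len h1
        rw [hyr]
        simp only [pvS, List.sum_cons] at *
        omega
      have hlt' : (t.length : Int) = k := by rw [hlt]; exact hmk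
      rw [hMy]
      rw [hlt'] at hSt
      have he : (k + 1) * -y = k * -y + -y := by ring
      have hr'0 : (0 : Int) ≤ r'.length := by positivity
      omega
    obtain ⟨hcl, hcu⟩ := pvCeil_bracket (a := pvS h) hk0
    have hS1 : (1 : Int) ≤ pvS h := by
      have := pvS_ge_len hb
      omega
    have hc1 : 1 ≤ pvCeil (pvS h) k := by
      by_contra hcc
      push_neg at hcc
      have h1 : pvCeil (pvS h) k * k ≤ 0 :=
        mul_nonpos_of_nonpos_of_nonneg (by omega) (le_of_lt hk0)
      omega
    have hc' : pvCeil (pvS (r ++ mp)) k = pvCeil (pvS h) k - 1 := by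
      apply pvCeil_eq hk0
      · rw [hS_rmp, hmk]
        have he : (pvCeil (pvS h) k - 1 - 1) * k = (pvCeil (pvS h) k - 1) * k - k := by ring
        omega
      · rw [hS_rmp, hmk]
        have he : (pvCeil (pvS h) k - 1) * k = pvCeil (pvS h) k * k - k := by ring
        omega
    have hdich : pvM r < pvM h ∨ pvM h + 1 ≤ pvCeil (pvS h) k := by
      by_cases heq : pvM r = pvM h
      · right
        have h1 := hkey heq
        have h2 : pvM h * k < pvCeil (pvS h) k * k := by
          have he : (k + 1) * pvM h = pvM h * k + pvM h := by ring
          omega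
        have := lt_of_mul_lt_mul_right h2 (le_of_lt hk0)
        omega
      · left
        omega
    simp only [pvAns, hne, hne', if_false, if_neg]
    rw [hM_rmp, hc', hMt]
    omega

theorem pvLoopA_eq {k : Int} (hk : 1 ≤ k) : ∀ (fuel : Nat) (h : List Int) (days : Int),
    h.Pairwise (· ≤ ·) → (∀ x ∈ h, x ≤ -1) → pvAns k h ≤ fuel →
    pvLoopA k fuel h days = days + pvAns k h := by
  intro fuel
  induction fuel with
  | zero =>
    intro h days hs hb hans
    cases h with
    | nil => simp [pvLoopA, pvAns]
    | cons x t =>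
      exfalso
      have h1 : -x ≤ pvM (x :: t) := le_pvM (by simp)
      have h2 := hb x (by simp)
      have h3 : pvAns k (x :: t) = max (pvM (x :: t)) (pvCeil (pvS (x :: t)) k) := by
        simp [pvAns]
      omega
  | succ f ih =>
    intro h days hs hb hans
    cases h with
    | nil => simp [pvLoopA, pvAns]
    | cons x t =>
      obtain ⟨hs', hb', hstep⟩ := pvDay_step hk (by simp) hs hb
      have hrec := ih (pvDay k (x :: t)) (days + 1) hs' hb' (by push_cast at hans ⊢; omega)
      show pvLoopA k f (pvDay k (x :: t)) (days + 1) = days + pvAns k (x :: t)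
      rw [hrec, hstep]
      ring

theorem pvCeil_le_self {a k : Int} (hk : 0 < k) (ha : 0 ≤ a) : pvCeil a k ≤ a := by
  obtain ⟨h1, h2⟩ := pvCeil_bracket (a := a) hk
  by_cases hcc : pvCeil a k ≤ 0
  · omega
  · push_neg at hcc
    have h3 : pvCeil a k - 1 ≤ (pvCeil a k - 1) * k := le_mul_of_one_le_right (by omega) hk
    omega

theorem pvDict_update_items_len : ∀ (l : List (String × Int)) (d : PySem.Dict String Int),
    d.items.length ≤ (d.update l).items.length := by
  intro l
  induction l with
  | nil => intro d; simp [PySem.Dict.update]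
  | cons p t ih =>
    intro d
    have h1 : d.items.length ≤ (d.insert p.1 p.2).items.length := by
      rw [PySem.Dict.items_insert]
      split_ifs <;> simp
    have h2 := ih (d.insert p.1 p.2)
    simp only [PySem.Dict.update, List.foldl_cons] at *
    omega

theorem pvItems_ofList_ne_nil {cases : List (String × Int)} (h : cases ≠ []) :
    (PySem.Dict.ofList cases).items ≠ [] := by
  obtain ⟨p, t, rfl⟩ := List.exists_cons_of_ne_nil h
  apply List.ne_nil_of_length_pos
  have h1 := pvDict_update_items_len t (PySem.Dict.empty.insert p.1 p.2)
  have h2 : (PySem.Dict.empty.insert p.1 p.2).items.length = 1 := by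
    rw [PySem.Dict.items_insert]
    simp [PySem.Dict.contains_empty, PySem.Dict.empty]
  have h3 : PySem.Dict.ofList (p :: t) = (PySem.Dict.empty.insert p.1 p.2).update t := by
    simp [PySem.Dict.ofList, PySem.Dict.update]
  rw [h3]
  omega

-- the initial heap build
theorem foldl_build_perm : ∀ (l : List (String × Int)) (hp : List Int),
    (l.foldl (fun hp p => pvPush hp (-p.2)) hp).Perm (hp ++ l.map (fun p => -p.2)) := by
  intro l
  induction l with
  | nil => intro hp; simp
  | cons x t ih =>
    intro hp
    simp only [List.foldl_cons, List.map_cons]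
    refine ((ih (pvPush hp (-x.2))).trans ?_)
    refine List.Perm.trans (List.Perm.append_right _ (List.perm_orderedInsert _ _ _)) ?_
    exact List.perm_middle.symm

theorem foldl_build_sorted : ∀ (l : List (String × Int)) (hp : List Int), hp.Pairwise (· ≤ ·) →
    (l.foldl (fun hp p => pvPush hp (-p.2)) hp).Pairwise (· ≤ ·) := by
  intro l
  induction l with
  | nil => intro hp h; simpa using h
  | cons x t ih =>
    intro hp h
    exact ih _ (List.Pairwise.orderedInsert _ _ h)

-- B's running max equals pvM on the negated values
theorem pvM_neg_vals : ∀ (x : Int) (t : List Int), 0 ≤ x →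
    pvM ((x :: t).map (fun v => -v)) = t.foldl max x := by
  intro x t
  induction t generalizing x with
  | nil => intro hx; simp only [List.map_cons, List.map_nil, pvM, List.foldr_cons,
      List.foldr_nil, List.foldl_nil]; omega
  | cons y t ih =>
    intro hx
    have h1 := ih (max x y) (by omega)
    simp only [List.map_cons, pvM, List.foldr_cons, List.foldl_cons] at *
    omega

-- ===== VERDICT (by name: the statement is the Claim_ definition above) =====
theorem legal_backlog_spec : Claim_equal_legal_backlog := by
  unfold Claim_equal_legal_backlog
  intro cases mds _hdom hpre
  unfold Spec_legal_backlog
  obtain ⟨hvals, hkor⟩ := hpre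
  by_cases hc : cases = []
  · subst hc
    rfl
  · have hkk : 1 ≤ mds := hkor.resolve_left hc
    have hitemsne : (PySem.Dict.ofList cases).items ≠ [] := pvItems_ofList_ne_nil hc
    obtain ⟨p0, it, hit⟩ := List.exists_cons_of_ne_nil hitemsne
    have hbv : ∀ v ∈ (PySem.Dict.ofList cases).items.map (fun x => x.2), 1 ≤ v := hvals
    -- the initial heap is a sorted permutation of the negated values
    have hperm : ((PySem.Dict.ofList cases).items.foldl (fun hp p => pvPush hp (-p.2)) []).Perm
        ((PySem.Dict.ofList cases).items.map (fun p => -p.2)) := by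
      simpa using foldl_build_perm (PySem.Dict.ofList cases).items []
    have hsort := foldl_build_sorted (PySem.Dict.ofList cases).items [] (by simp)
    have hbound : ∀ x ∈ (PySem.Dict.ofList cases).items.foldl (fun hp p => pvPush hp (-p.2)) [],
        x ≤ -1 := by
      intro x hx
      obtain ⟨p, hp, rfl⟩ := List.mem_map.mp (hperm.subset hx)
      have := hbv p.2 (List.mem_map_of_mem hp)
      omega
    have hmapmap : (PySem.Dict.ofList cases).items.map (fun p => -p.2)
        = ((PySem.Dict.ofList cases).items.map (fun x => x.2)).map (fun v => -v) := by
      simp [List.map_map, Function.comp]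
    have hSneg : pvS ((PySem.Dict.ofList cases).items.map (fun p => -p.2))
        = ((PySem.Dict.ofList cases).items.map (fun x => x.2)).sum := by
      rw [hmapmap]
      simp only [pvS]
      rw [← List.sum_neg]
      ring
    have hSnn : (0 : Int) ≤ pvS ((PySem.Dict.ofList cases).items.foldl
        (fun hp p => pvPush hp (-p.2)) []) := by
      have h1 := pvS_ge_len hbound
      omega
    have hfuel : pvAns mds ((PySem.Dict.ofList cases).items.foldl (fun hp p => pvPush hp (-p.2)) [])
        ≤ (((PySem.Dict.ofList cases).items.map (fun p => p.2.toNat)).sum + 1 : Nat) := by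
      have hM := pvM_le_pvS hbound
      have hC := pvCeil_le_self (a := pvS ((PySem.Dict.ofList cases).items.foldl
        (fun hp p => pvPush hp (-p.2)) [])) (by omega : (0:Int) < mds) hSnn
      have hSv : pvS ((PySem.Dict.ofList cases).items.foldl (fun hp p => pvPush hp (-p.2)) [])
          = ((PySem.Dict.ofList cases).items.map (fun x => x.2)).sum := by
        rw [pvS_perm hperm, hSneg]
      have htn := sum_le_toNat_sum ((PySem.Dict.ofList cases).items.map (fun x => x.2))
      have hmm : ((PySem.Dict.ofList cases).items.map (fun x => x.2)).map Int.toNat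
          = (PySem.Dict.ofList cases).items.map (fun p => p.2.toNat) := by
        simp [List.map_map, Function.comp]
      rw [hmm] at htn
      simp only [pvAns]
      have hcast : (((((PySem.Dict.ofList cases).items.map (fun p => p.2.toNat)).sum + 1 : Nat)) : Int)
          = (((((PySem.Dict.ofList cases).items.map (fun p => p.2.toNat)).sum : Nat)) : Int) + 1 :=
        Nat.cast_add_one _
      rw [hcast]
      split_ifs with hh
      · omega
      · omega
    -- evaluate A through the loop lemma
    have hA : legal_backlog cases mds
        = pvAns mds ((PySem.Dict.ofList cases).items.foldl (fun hp p => pvPush hp (-p.2)) []) := by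
      unfold legal_backlog
      rw [pvLoopA_eq hkk _ _ 0 hsort hbound hfuel]
      omega
    rw [hA, pvAns_perm hperm]
    -- both sides in terms of the value list
    have hvcons : (PySem.Dict.ofList cases).values = p0.2 :: it.map (fun x => x.2) := by
      unfold PySem.Dict.values
      rw [hit]
      simp
    have hnegne : (PySem.Dict.ofList cases).items.map (fun p => -p.2) ≠ [] := by
      rw [hit]; simp
    have hv0 : (0 : Int) ≤ p0.2 := by
      have := hbv p0.2 (by rw [hit]; simp)
      omega
    have hMv : pvM ((PySem.Dict.ofList cases).items.map (fun p => -p.2))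
        = (it.map (fun x => x.2)).foldl max p0.2 := by
      rw [hmapmap]
      have : (PySem.Dict.ofList cases).items.map (fun x => x.2) = p0.2 :: it.map (fun x => x.2) := by
        rw [hit]; simp
      rw [this]
      exact pvM_neg_vals p0.2 (it.map (fun x => x.2)) hv0
    unfold legal_backlog_alt
    rw [if_neg hc]
    simp only [hvcons, PySem.List.max?_id_cons]
    simp only [pvAns, hnegne, if_neg, if_false]
    rw [hMv, hSneg]
    have hsum : ((PySem.Dict.ofList cases).items.map (fun x => x.2)).sum
        = (p0.2 :: it.map (fun x => x.2)).sum := by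
      rw [hit]; simp
    rw [hsum]
    rfl
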